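-- pv_equiv track=rewrite | github.com/WietzeSlagman/Bomberbot_Hint-generation | parse_output.py | translate_same_locs
-- ===== SOURCE A (Python) =====
-- def translate_same_locs(dir_list, best_solution, rotations):
--     '''Given a direction list, translate tiles that occur multiple times
--     to the correct moves (involving a smash)'''
--     new_dir_list = []
--     counter = 0
--     smash_count = 0
--     first_tile = True
--     # Count the amount of 'same locs', then call get_moves() to translate
--     for i, direction in enumerate(dir_list):
--         if direction == "same loc":
--             counter+=1
--             if i == len(dir_list)-1:
--                 moves = get_moves(counter, first_tile, rotations)
--                 new_dir_list.extend(moves)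
--         else:
--             moves = get_moves(counter, first_tile, rotations)
--             new_dir_list.extend(moves)
--             new_dir_list.append(direction)
--             counter = 0
--             first_tile = False
--     return new_dir_list
--
-- def get_moves(counter, first_tile, rotations):
--     ''' Given a counter and the rotations, return the correct sequence of
--     moves'''
--     moves = []
--     if counter == 1:
--         moves = ["smash"]
--         del rotations[0]
--     elif counter == 2:
--         if first_tile:
--             moves = [rotations[0], "smash"]
--             del rotations[0]
--         else:
--             moves = [rotations[0], "smash"]
--             del rotations[0]
--     elif counter == 3:
--         moves = ["smash", rotations[0], "smash"]
--         del rotations[0]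
--     return moves
-- ===== SOURCE B (Python) =====
-- def translate_same_locs(dir_list, best_solution, rotations):
--     '''Two-pass rewrite: first split dir_list into groups
--     (run_of_same_loc_count, terminating direction or None),
--     then emit the move sequence for each group.'''
--     groups = []
--     run = 0
--     for d in dir_list:
--         if d == "same loc":
--             run += 1
--         else:
--             groups.append((run, d))
--             run = 0
--     if run > 0:
--         groups.append((run, None))
--     out = []
--     for cnt, d in groups:
--         out.extend(_moves_for(cnt, rotations))
--         if d is not None:
--             out.append(d)
--     return out
--
-- def _moves_for(cnt, rotations):
--     if 1 <= cnt <= 3: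
--         r = rotations.pop(0)
--         if cnt == 1:
--             return ["smash"]
--         if cnt == 2:
--             return [r, "smash"]
--         return ["smash", r, "smash"]
--     return []
-- ===== Notes on version B (the rewrite author's own statement) =====
-- stated objective: alternative
-- what changed: B replaces A's single interleaved loop (counter + end-of-list flush inside the loop, plus the dead first_tile flag) with two passes: one pass splits dir_list into (same-loc-run-count, optional direction) groups, a second pass translates each group into moves, popping one rotation per run of length 1-3.
import Mathlib
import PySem

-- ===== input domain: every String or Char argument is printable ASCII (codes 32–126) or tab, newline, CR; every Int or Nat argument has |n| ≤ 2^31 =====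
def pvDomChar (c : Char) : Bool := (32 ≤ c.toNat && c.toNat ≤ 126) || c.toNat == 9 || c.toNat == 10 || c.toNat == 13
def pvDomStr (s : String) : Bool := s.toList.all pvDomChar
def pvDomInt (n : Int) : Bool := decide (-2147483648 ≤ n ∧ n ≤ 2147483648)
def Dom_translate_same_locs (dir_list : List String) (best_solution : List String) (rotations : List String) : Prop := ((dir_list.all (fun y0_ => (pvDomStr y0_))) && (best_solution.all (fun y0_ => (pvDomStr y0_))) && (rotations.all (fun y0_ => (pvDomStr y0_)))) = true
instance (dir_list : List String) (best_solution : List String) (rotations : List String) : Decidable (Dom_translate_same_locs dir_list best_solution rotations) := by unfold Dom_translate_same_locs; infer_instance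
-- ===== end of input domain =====

-- B rewrites A's interleaved counter/flush loop as two passes (group run-lengths, then emit moves).
-- Both Pythons mutate `rotations` in place (one pop per run of length 1-3, same order in A and B);
-- the equivalence proved here is about the RETURN value; the ports thread rotations as explicit state.

-- ===== PORT A =====
-- get_moves: returns (moves, remaining rotations). Python reads rotations[0] / del rotations[0],
-- which raises on an empty list; Pre_ excludes exactly those inputs, so headD/tail is exact inside Pre_.
def pvGetMoves (counter : Nat) (first_tile : Bool) (rotations : List String) :
    List String × List String :=
  if counter == 1 then
    (["smash"], rotations.tail)
  else if counter == 2 then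
    (if first_tile then ([rotations.headD "", "smash"], rotations.tail)
     else ([rotations.headD "", "smash"], rotations.tail))
  else if counter == 3 then
    (["smash", rotations.headD "", "smash"], rotations.tail)
  else ([], rotations)

-- the for-loop over enumerate(dir_list), as structural recursion on the enumerated list
def pvALoop (n : Int) : List (Int × String) → Nat → Bool → List String → List String
  | [], _, _, _ => []
  | (i, direction) :: rest, counter, first_tile, rots =>
    if direction == "same loc" then
      let counter := counter + 1
      if i == n - 1 then
        let p := pvGetMoves counter first_tile rots
        p.1 ++ pvALoop n rest counter first_tile p.2
      else
        pvALoop n rest counter first_tile rots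
    else
      let p := pvGetMoves counter first_tile rots
      p.1 ++ [direction] ++ pvALoop n rest 0 false p.2

def translate_same_locs (dir_list : List String) (best_solution : List String) (rotations : List String) : List String :=
  pvALoop (dir_list.length : Int) (PySem.List.enumerate dir_list) 0 true rotations

-- ===== PORT B =====
-- pass 1: split into groups (run length of "same loc", terminating direction or none)
def pvGroups : List String → Nat → List (Nat × Option String)
  | [], run => if run > 0 then [(run, none)] else []
  | d :: rest, run =>
    if d == "same loc" then pvGroups rest (run + 1)
    else (run, some d) :: pvGroups rest 0

-- _moves_for: pops one rotation for runs of length 1-3 (pop(0) raises on empty; exact inside Pre_)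
def pvMovesFor (cnt : Nat) (rotations : List String) : List String × List String :=
  if 1 ≤ cnt ∧ cnt ≤ 3 then
    let r := rotations.headD ""
    ((if cnt == 1 then ["smash"]
      else if cnt == 2 then [r, "smash"]
      else ["smash", r, "smash"]), rotations.tail)
  else ([], rotations)

-- pass 2: emit moves for each group
def pvEmit : List (Nat × Option String) → List String → List String
  | [], _ => []
  | g :: rest, rots =>
    let p := pvMovesFor g.1 rots
    p.1 ++ (match g.2 with | some d => [d] | none => []) ++ pvEmit rest p.2

def translate_same_locs_alt (dir_list : List String) (best_solution : List String) (rotations : List String) : List String :=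
  pvEmit (pvGroups dir_list 0) rotations

-- ===== PRECONDITION & SPEC =====
-- Pre_ excludes exactly the inputs on which Python A raises IndexError: each maximal run of
-- consecutive "same loc" entries of length 1-3 pops one rotation, so there must be at least
-- that many rotations. (Runs of length ≥ 4 pop nothing — get_moves is a no-op there.)
def Pre_translate_same_locs (dir_list : List String) (best_solution : List String) (rotations : List String) : Prop :=
  ((dir_list.splitBy (fun a b => a == b)).filter
      (fun g => g.head? == some "same loc" && g.length ≤ 3)).length ≤ rotations.length
instance (dir_list : List String) (best_solution : List String) (rotations : List String) : Decidable (Pre_translate_same_locs dir_list best_solution rotations) := by unfold Pre_translate_same_locs; infer_instance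

def pvWitness_translate_same_locs : List String × List String × List String :=
  (["same loc", "up", "same loc", "same loc"], [], ["r1", "r2"])

def Spec_translate_same_locs (dir_list : List String) (best_solution : List String) (rotations : List String) (out : List String) : Prop := out = translate_same_locs_alt dir_list best_solution rotations
instance (dir_list : List String) (best_solution : List String) (rotations : List String) (out : List String) : Decidable (Spec_translate_same_locs dir_list best_solution rotations out) := by unfold Spec_translate_same_locs; infer_instance

-- ===== CLAIM (what is proved, stated in full; the proofs are below) =====
def Claim_equal_translate_same_locs : Prop := ∀ (dir_list : List String) (best_solution : List String) (rotations : List String), Dom_translate_same_locs dir_list best_solution rotations → Pre_translate_same_locs dir_list best_solution rotations → Spec_translate_same_locs dir_list best_solution rotations (translate_same_locs dir_list best_solution rotations)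

-- ===== LEMMAS AND PROOFS =====

-- get_moves ignores first_tile and agrees with _moves_for
theorem pvGetMoves_eq_movesFor (c : Nat) (f : Bool) (r : List String) :
    pvGetMoves c f r = pvMovesFor c r := by
  unfold pvGetMoves pvMovesFor
  rcases c with _ | _ | _ | _ | c <;> cases f <;> simp

theorem pvKey (rest : List String) :
    ∀ (i : Int) (counter : Nat) (first : Bool) (rots : List String),
      (rest = [] → counter = 0) →
      pvALoop (i + rest.length) (PySem.List.enumerate rest i) counter first rots
        = pvEmit (pvGroups rest counter) rots := by
  induction rest with
  | nil =>
    intro i counter first rots h0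
    simp [h0 rfl, PySem.List.enumerate_nil, pvALoop, pvGroups, pvEmit]
  | cons d tl ih =>
    intro i counter first rots _
    rw [PySem.List.enumerate_cons]
    by_cases hd : d = "same loc"
    · subst hd
      simp only [pvALoop, pvGroups, beq_self_eq_true, if_true]
      by_cases htl : tl = []
      · subst htl
        have hcond : (i == i + (([] : List String).length + 1 : Nat) - 1) = true := by
          simp
        simp only [List.length_cons, hcond, if_true]
        rw [pvGetMoves_eq_movesFor]
        simp [PySem.List.enumerate_nil, pvALoop, pvGroups, pvEmit]
      · have hlen : 0 < tl.length := List.length_pos_iff.mpr htl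
        have hcond : (i == i + ((tl.length + 1 : Nat) : Int) - 1) = false := by
          simp only [beq_eq_false_iff_ne, ne_eq]
          omega
        simp only [List.length_cons, hcond, Bool.false_eq_true, if_false]
        have hn : i + ((tl.length + 1 : Nat) : Int) = (i + 1) + (tl.length : Int) := by
          push_cast; ring
        rw [hn, ih _ _ _ _ (fun h => absurd h htl)]
    · have hbeq : (d == "same loc") = false := by
        simp [hd]
      simp only [pvALoop, pvGroups, hbeq, if_false, Bool.false_eq_true]
      rw [pvGetMoves_eq_movesFor]
      have hn : i + (((d :: tl).length : Nat) : Int) = (i + 1) + (tl.length : Int) := by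
        simp; ring
      rw [hn, ih _ _ _ _ (fun _ => rfl)]
      simp [pvEmit]

theorem translate_same_locs_spec : Claim_equal_translate_same_locs := by
  intro dl bs rots _ _
  unfold Spec_translate_same_locs translate_same_locs translate_same_locs_alt
  have := pvKey dl 0 0 true rots (fun _ => rfl)
  simpa using this
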